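-- pv_equiv track=rewrite | github.com/KNIGHTAI7/ClinIQ | utils/helpers.py | format_entity_output
-- ===== SOURCE A (Python) =====
-- from typing import Any, Dict, List, Optional
--
-- def format_entity_output(entities: List[Dict]) -> str:
--     """Format extracted entities as readable text for display."""
--     if not entities:
--         return "No entities found."
--
--     output = []
--     # Group by entity type
--     entity_groups: Dict[str, List[str]] = {}
--     for entity in entities:
--         label = entity.get("label", "UNKNOWN")
--         text = entity.get("text", "")
--         if label not in entity_groups:
--             entity_groups[label] = []
--         if text not in entity_groups[label]:
--             entity_groups[label].append(text)
--
--     for label, items in sorted(entity_groups.items()):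
--         output.append(f"\n🏷️  {label}:")
--         for item in items:
--             output.append(f"   • {item}")
--
--     return "\n".join(output)
-- ===== SOURCE B (Python) =====
-- def format_entity_output(entities):
--     """Format extracted entities as readable text for display."""
--     if not entities:
--         return "No entities found."
--     pairs = [(e.get("label", "UNKNOWN"), e.get("text", "")) for e in entities]
--     lines = []
--     for label in sorted({l for l, _ in pairs}):
--         lines.append(f"\n\U0001F3F7\uFE0F  {label}:")
--         lines.extend(f"   \u2022 {t}" for t in dict.fromkeys(t for l, t in pairs if l == label))
--     return "\n".join(lines)
-- ===== Notes on version B (the rewrite author's own statement) =====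
-- stated objective: alternative
-- what changed: A groups entities into a dict of label->texts in one pass and sorts its items; B first computes the sorted distinct labels, then for each label rescans the entity list, filtering matching texts and order-preservingly deduplicating them.
import Mathlib
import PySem

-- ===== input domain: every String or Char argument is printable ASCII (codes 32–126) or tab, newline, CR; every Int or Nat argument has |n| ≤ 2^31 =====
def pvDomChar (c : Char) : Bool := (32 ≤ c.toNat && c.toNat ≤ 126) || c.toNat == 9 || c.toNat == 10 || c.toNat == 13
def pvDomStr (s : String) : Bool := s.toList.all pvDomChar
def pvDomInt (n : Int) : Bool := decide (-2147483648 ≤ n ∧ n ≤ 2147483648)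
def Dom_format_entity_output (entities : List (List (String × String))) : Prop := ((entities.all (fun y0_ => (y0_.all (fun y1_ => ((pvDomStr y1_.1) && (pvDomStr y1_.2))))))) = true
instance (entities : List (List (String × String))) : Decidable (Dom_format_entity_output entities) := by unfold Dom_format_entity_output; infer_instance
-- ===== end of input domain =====

-- B replaces A's single grouping pass into a dict by a discover-labels-then-rescan-per-label
-- decomposition (sorted distinct labels, then a filter + ordered dedup per label); same cost class, no speed claim.

-- ===== PORT A =====
def format_entity_output (entities : List (List (String × String))) : String :=
  if entities = [] then "No entities found."
  else
    let groups : PySem.Dict String (List String) :=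
      entities.foldl (fun d e =>
        let label := (PySem.Dict.ofList e).getD "label" "UNKNOWN"
        let text  := (PySem.Dict.ofList e).getD "text" ""
        let d1 := if d.contains label then d else d.insert label []
        if text ∈ d1.getD label [] then d1 else d1.insert label (d1.getD label [] ++ [text]))
        PySem.Dict.empty
    -- sorted(entity_groups.items()) compares (label, items) tuples; dict keys are distinct, so it is sorting by label
    let out : List String :=
      (PySem.List.sorted groups.items (fun p => p.1)).foldl (fun acc p =>
        p.2.foldl (fun acc2 item => acc2 ++ ["   • " ++ item]) (acc ++ ["\n🏷️  " ++ p.1 ++ ":"])) []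
    PySem.Str.join "\n" out

-- ===== PORT B =====
def format_entity_output_alt (entities : List (List (String × String))) : String :=
  if entities = [] then "No entities found."
  else
    let pairs : List (String × String) :=
      entities.map (fun e => ((PySem.Dict.ofList e).getD "label" "UNKNOWN", (PySem.Dict.ofList e).getD "text" ""))
    let lines : List String :=
      (PySem.List.sorted (PySem.Set.ofList (pairs.map (·.1))) (fun l => l)).flatMap (fun label =>
        ("\n🏷️  " ++ label ++ ":") ::
          (PySem.List.dedup ((pairs.filter (fun p => p.1 == label)).map (·.2))).map (fun t => "   • " ++ t))
    PySem.Str.join "\n" lines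

-- ===== PRECONDITION & SPEC =====
def Spec_format_entity_output (entities : List (List (String × String))) (out : String) : Prop := out = format_entity_output_alt entities
instance (entities : List (List (String × String))) (out : String) : Decidable (Spec_format_entity_output entities out) := by unfold Spec_format_entity_output; infer_instance

-- ===== CLAIM (what is proved, stated in full; the proofs are below) =====
def Claim_equal_format_entity_output : Prop := ∀ (entities : List (List (String × String))), Dom_format_entity_output entities → Spec_format_entity_output entities (format_entity_output entities)

-- ===== LEMMAS AND PROOFS =====

/-- The (label, text) extraction both Pythons perform on one entity dict. -/
def pvPair (e : List (String × String)) : String × String :=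
  ((PySem.Dict.ofList e).getD "label" "UNKNOWN", (PySem.Dict.ofList e).getD "text" "")

/-- A's grouping-loop body, expressed on an extracted (label, text) pair. -/
def pvStep (d : PySem.Dict String (List String)) (p : String × String) : PySem.Dict String (List String) :=
  let d1 := if d.contains p.1 then d else d.insert p.1 []
  if p.2 ∈ d1.getD p.1 [] then d1 else d1.insert p.1 (d1.getD p.1 [] ++ [p.2])

theorem pvStep_keys (d : PySem.Dict String (List String)) (p : String × String) :
    (pvStep d p).keys = PySem.Set.add d.keys p.1 := by
  unfold pvStep
  by_cases hc : d.contains p.1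
  · have hmem : p.1 ∈ d.keys := (PySem.Dict.contains_iff_mem_keys d p.1).mp hc
    simp only [hc, if_true]
    split
    · simp [PySem.Set.add, PySem.Set.contains, hmem]
    · rw [PySem.Dict.keys_insert_of_contains d _ hc]
      simp [PySem.Set.add, PySem.Set.contains, hmem]
  · have hmem : p.1 ∉ d.keys := fun h => hc ((PySem.Dict.contains_iff_mem_keys d p.1).mpr h)
    simp only [hc, if_false, Bool.false_eq_true]
    rw [PySem.Dict.getD_insert_self]
    simp only [List.not_mem_nil, if_false]
    have hc2 : (d.insert p.1 []).contains p.1 = true := by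
      exact (PySem.Dict.contains_iff_mem_keys _ _).mpr (by
        rw [PySem.Dict.keys_insert_of_not_contains d _ (by simpa using hc)]
        simp)
    rw [PySem.Dict.keys_insert_of_contains _ _ hc2,
        PySem.Dict.keys_insert_of_not_contains d _ (by simpa using hc)]
    simp [PySem.Set.add, PySem.Set.contains, hmem]

theorem pvStep_getD (d : PySem.Dict String (List String)) (p : String × String) (l : String) :
    (pvStep d p).getD l [] =
      if p.1 = l then PySem.Set.add (d.getD l []) p.2 else d.getD l [] := by
  unfold pvStep
  by_cases hl : p.1 = l
  · subst hl
    by_cases hc : d.contains p.1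
    · simp only [hc, if_true]
      split <;> rename_i hmem
      · simp [PySem.Set.add, PySem.Set.contains, hmem]
      · rw [PySem.Dict.getD_insert_self]
        simp [PySem.Set.add, PySem.Set.contains, hmem]
    · have hd : d.getD p.1 [] = [] := PySem.Dict.getD_of_not_contains d [] (by simpa using hc)
      simp only [hc, if_false, Bool.false_eq_true]
      rw [PySem.Dict.getD_insert_self]
      simp [hd, PySem.Set.add, PySem.Set.contains, PySem.Dict.getD_insert_self]
  · by_cases hc : d.contains p.1
    · simp only [hc, if_true]
      split
      · simp
      · rw [PySem.Dict.getD_insert_of_ne _ _ _ (Ne.symm hl)]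
    · simp only [hc, if_false, Bool.false_eq_true]
      rw [PySem.Dict.getD_insert_self]
      simp only [List.not_mem_nil, if_false]
      rw [PySem.Dict.getD_insert_of_ne _ _ _ (Ne.symm hl),
          PySem.Dict.getD_insert_of_ne _ _ _ (Ne.symm hl)]
      simp [hl]

theorem pvFoldl_keys (ps : List (String × String)) :
    ∀ d, (ps.foldl pvStep d).keys = PySem.Set.update d.keys (ps.map (·.1)) := by
  induction ps with
  | nil => intro d; rfl
  | cons p ps ih =>
    intro d
    simp only [List.foldl_cons, List.map_cons]
    rw [ih, pvStep_keys]
    rfl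

theorem pvFoldl_getD (ps : List (String × String)) (l : String) :
    ∀ d, (ps.foldl pvStep d).getD l [] =
      PySem.Set.update (d.getD l []) ((ps.filter (fun p => p.1 == l)).map (·.2)) := by
  induction ps with
  | nil => intro d; rfl
  | cons p ps ih =>
    intro d
    simp only [List.foldl_cons, List.filter_cons]
    by_cases hl : p.1 = l
    · simp only [hl, beq_self_eq_true, if_true, List.map_cons]
      rw [ih, pvStep_getD]
      simp only [hl, if_true]
      rfl
    · have : (p.1 == l) = false := beq_eq_false_iff_ne.mpr hl
      simp only [this, Bool.false_eq_true, if_false]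
      rw [ih, pvStep_getD]
      simp [hl]

/-- A's output-building double loop is the per-label flatMap B performs. -/
theorem pvOut_flatMap (items : List (String × List String)) :
    ∀ acc : List String,
      items.foldl (fun acc p =>
        p.2.foldl (fun acc2 item => acc2 ++ ["   • " ++ item]) (acc ++ ["\n🏷️  " ++ p.1 ++ ":"])) acc
      = acc ++ items.flatMap (fun p => ("\n🏷️  " ++ p.1 ++ ":") :: p.2.map (fun t => "   • " ++ t)) := by
  induction items with
  | nil => intro acc; simp
  | cons p items ih =>
    intro acc
    simp only [List.foldl_cons, List.flatMap_cons]
    rw [PySem.List.foldl_append_singleton_eq_map, ih]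
    simp only [List.append_assoc, List.cons_append, List.nil_append]

-- ===== VERDICT (by name: the statement is the Claim_ definition above) =====
theorem format_entity_output_spec : Claim_equal_format_entity_output := by
  intro entities _
  unfold Spec_format_entity_output format_entity_output format_entity_output_alt
  by_cases h : entities = []
  · simp [h]
  · simp only [h, if_false]
    set ps : List (String × String) := entities.map pvPair with hps
    have hfold : entities.foldl (fun d e =>
        let label := (PySem.Dict.ofList e).getD "label" "UNKNOWN"
        let text  := (PySem.Dict.ofList e).getD "text" ""
        let d1 := if d.contains label then d else d.insert label []
        if text ∈ d1.getD label [] then d1 else d1.insert label (d1.getD label [] ++ [text]))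
        PySem.Dict.empty = ps.foldl pvStep PySem.Dict.empty := by
      rw [hps, List.foldl_map]; rfl
    rw [hfold]
    set groups := ps.foldl pvStep PySem.Dict.empty with hg
    have hkeys : groups.keys = PySem.Set.ofList (ps.map (·.1)) := by
      rw [hg, pvFoldl_keys]; rfl
    have hgetD : ∀ l, groups.getD l [] =
        PySem.List.dedup ((ps.filter (fun p => p.1 == l)).map (·.2)) := by
      intro l
      rw [hg, pvFoldl_getD, PySem.List.dedup_eq_ofList]
      rfl
    have hnodup : groups.keys.Nodup := by
      rw [hkeys]; exact PySem.Set.nodup_ofList _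
    have hitems : groups.items = groups.keys.map (fun k => (k, groups.getD k [])) :=
      PySem.Dict.items_eq_map_keys groups hnodup []
    have hsorted : PySem.List.sorted groups.items (fun p => p.1) =
        (PySem.List.sorted (PySem.Set.ofList (ps.map (·.1))) (fun l => l)).map
          (fun k => (k, groups.getD k [])) := by
      apply PySem.List.sorted_eq_of_perm_of_pairwise_lt
      · rw [hitems, hkeys]
        exact (PySem.List.sorted_perm _ _ _).map _
      · exact List.Pairwise.map _ (fun a b hab => hab) (PySem.List.sorted_ofList_pairwise_lt (ps.map (·.1)))
    rw [hsorted, pvOut_flatMap, List.nil_append, List.flatMap_map]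
    have hL : (List.map (fun e => ((PySem.Dict.ofList e).getD "label" "UNKNOWN", (PySem.Dict.ofList e).getD "text" "")) entities) = ps := rfl
    rw [hL]
    congr 1
    congr 1
    funext k
    simp only [hgetD]
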